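-- pv_equiv track=rewrite | github.com/ss-won/ps_study | ss-won/programmers/17686.py | solution
-- ===== SOURCE A (Python) =====
-- def solution(files):
--     answer = []
--     num = [chr(ord('0')+i) for i in range(10)]
--     fileArr = []
--     for idx in range(len(files)):
--         file, s, e = files[idx], -1, -1
--         for i in range(len(file)):
--             if s == -1 and file[i] in num:
--                 s = i
--             if s != -1 and e == -1 and not file[i] in num:
--                 e = i
--                 break
--         if e == -1:
--             head, number, tail = file[0:s].lower(), int(file[s:]), ''
--         else:
--             head, number, tail = file[0:s].lower(), int(file[s:e]), file[e:]
--         fileArr.append((head, number, tail, idx))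
--     res = sorted(fileArr, key=lambda x: (x[0], x[1], x[3]))
--     answer = [files[idx] for h, n, t, idx in res]
--     return answer
-- ===== SOURCE B (Python) =====
-- def solution(files):
--     # Bucket the filenames by (lower-cased head, numeric value) in one pass,
--     # then sort only the distinct keys and concatenate the buckets:
--     # stability comes from bucket append order, no per-file comparison sort.
--     groups = {}
--     for f in files:
--         i = 0
--         while i < len(f) and not ('0' <= f[i] <= '9'):
--             i += 1
--         j = i
--         while j < len(f) and '0' <= f[j] <= '9':
--             j += 1
--         k = (f[:i].lower(), int(f[i:j]))
--         groups[k] = groups.get(k, []) + [f]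
--     out = []
--     for k in sorted(groups):
--         out += groups[k]
--     return out
-- ===== Notes on version B (the rewrite author's own statement) =====
-- stated objective: alternative
-- what changed: B replaces A's decorate-sort-extract pipeline (build (head,number,tail,index) tuples, comparison-sort all of them with an index tiebreak, re-index into files) with a bucket-grouping algorithm: one pass builds a dict mapping each distinct (lowercased head, number) key to its bucket of filenames in input order, then only the distinct keys are sorted and the buckets concatenated, stability coming from bucket append order instead of an index tiebreak.
import Mathlib
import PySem

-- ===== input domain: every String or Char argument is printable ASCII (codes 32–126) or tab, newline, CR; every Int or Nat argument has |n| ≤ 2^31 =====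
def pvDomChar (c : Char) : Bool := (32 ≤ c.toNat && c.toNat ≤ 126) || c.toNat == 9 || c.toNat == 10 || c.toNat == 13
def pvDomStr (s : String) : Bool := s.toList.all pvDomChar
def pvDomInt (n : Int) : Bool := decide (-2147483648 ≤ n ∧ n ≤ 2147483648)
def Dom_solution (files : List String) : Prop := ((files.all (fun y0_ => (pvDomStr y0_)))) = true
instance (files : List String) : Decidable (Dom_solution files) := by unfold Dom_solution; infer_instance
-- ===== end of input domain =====

-- B replaces A's decorate / comparison-sort-with-index-tiebreak / extract pipeline by a
-- bucket-grouping algorithm: a dict from (lower-cased head, number) to the bucket of its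
-- filenames in input order, the distinct keys sorted, the buckets concatenated (objective: alternative).

-- ===== PORT A =====
-- num = [chr(ord('0')+i) for i in range(10)]
def pvNum : List Char :=
  (PySem.List.pyRange 0 10 1).map (fun i => Char.ofNat ((Char.toNat '0' : Int) + i).toNat)

-- the inner 'for i in range(len(file))' scan with its break; state (i, s, e)
def pvScan : List Char → Int → Int → Int → Int × Int
  | [], _, s, e => (s, e)
  | c :: cs, i, s, e =>
    let s' := if s == -1 && pvNum.contains c then i else s
    if s' != -1 && e == -1 && !(pvNum.contains c) then (s', i)
    else pvScan cs (i + 1) s' e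

-- one iteration of the outer loop: the tuple (head, number, tail, idx) appended to fileArr.
-- int() raises only on a file without a digit (outside Pre_); there '.getD 0' is never reached.
def pvParse (file : String) (idx : Int) : String × Int × String × Int :=
  let se := pvScan file.toList 0 (-1) (-1)
  let s := se.1
  let e := se.2
  if e == -1 then
    (PySem.Str.lower (PySem.Str.slice file (some 0) (some s)),
     (PySem.Int.ofStr? (PySem.Str.slice file (some s) none)).getD 0, "", idx)
  else
    (PySem.Str.lower (PySem.Str.slice file (some 0) (some s)),
     (PySem.Int.ofStr? (PySem.Str.slice file (some s) (some e))).getD 0,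
     PySem.Str.slice file (some e) none, idx)

-- sorted(fileArr, key=lambda x: (x[0], x[1], x[3])): the Lex product is Python's tuple order
def solution (files : List String) : List String :=
  let fileArr := (PySem.List.pyRange 0 (PySem.List.len files) 1).foldl
      (fun arr idx => arr ++ [pvParse (PySem.List.pyGetD files idx "") idx]) []
  let res := PySem.List.sorted fileArr (fun x => toLex (x.1, toLex (x.2.1, x.2.2.2))) false
  res.foldl (fun ans t => ans ++ [PySem.List.pyGetD files t.2.2.2 ""]) []

-- ===== PORT B =====
-- the first while loop: i = number of leading non-digit characters; f[:i].lower()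
def pvHead (f : String) : String :=
  PySem.Str.lower (String.ofList (f.toList.takeWhile (fun c => !PySem.Chars.isdigit c)))

-- the second while loop: f[i:j] = the digit run starting at i; int() of it (nonempty inside Pre_)
def pvNumber (f : String) : Int :=
  (PySem.Int.ofChars?
    ((f.toList.dropWhile (fun c => !PySem.Chars.isdigit c)).takeWhile PySem.Chars.isdigit)).getD 0

-- k = (f[:i].lower(), int(f[i:j]))
def pvKey (f : String) : String × Int := (pvHead f, pvNumber f)

-- groups[k] = groups.get(k, []) + [f]; then 'for k in sorted(groups): out += groups[k]'
def solution_alt (files : List String) : List String :=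
  let groups : PySem.Dict (String × Int) (List String) :=
    files.foldl (fun d f => d.modify (pvKey f) [] (fun l => l ++ [f])) PySem.Dict.empty
  let ks := PySem.List.sorted groups.keys (fun k => toLex k) false
  ks.foldl (fun out k => out ++ groups.getD k []) []

-- ===== PRECONDITION & SPEC =====
-- Pre_ excludes files containing no ASCII digit: A's int() raises ValueError there (B's key raises too).
def Pre_solution (files : List String) : Prop :=
  (files.all (fun f => f.toList.any PySem.Chars.isdigit)) = true
instance (files : List String) : Decidable (Pre_solution files) := by
  unfold Pre_solution; infer_instance

def pvWitness_solution : List String := ["A2", "a10", "b1"]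

def Spec_solution (files : List String) (out : List String) : Prop := out = solution_alt files
instance (files : List String) (out : List String) : Decidable (Spec_solution files out) := by unfold Spec_solution; infer_instance

-- ===== CLAIM (what is proved, stated in full; the proofs are below) =====
def Claim_equal_solution : Prop := ∀ (files : List String), Dom_solution files → Pre_solution files → Spec_solution files (solution files)

-- ===== LEMMAS AND PROOFS =====

-- the tuple key A sorts by, and its (head, number) part
def pvKeyA (t : String × Int × String × Int) : Lex (String × Lex (Int × Int)) :=
  toLex (t.1, toLex (t.2.1, t.2.2.2))
def pvTK (t : String × Int × String × Int) : String × Int := (t.1, t.2.1)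

lemma pvNum_contains (c : Char) : pvNum.contains c = PySem.Chars.isdigit c := by
  have h : pvNum = ['0','1','2','3','4','5','6','7','8','9'] := by decide
  rw [h, Bool.eq_iff_iff]
  simp only [List.contains_cons, List.contains_nil, Bool.or_eq_true, beq_iff_eq,
    PySem.Chars.isdigit, Bool.and_eq_true, decide_eq_true_eq]
  constructor
  · intro hmem
    rcases hmem with rfl | rfl | rfl | rfl | rfl | rfl | rfl | rfl | rfl | rfl | h'
    · exact ⟨by decide, by decide⟩
    · exact ⟨by decide, by decide⟩
    · exact ⟨by decide, by decide⟩
    · exact ⟨by decide, by decide⟩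
    · exact ⟨by decide, by decide⟩
    · exact ⟨by decide, by decide⟩
    · exact ⟨by decide, by decide⟩
    · exact ⟨by decide, by decide⟩
    · exact ⟨by decide, by decide⟩
    · exact ⟨by decide, by decide⟩
    · exact absurd h' (by decide)
  · rintro ⟨h1, h2⟩
    have hn1 : 48 ≤ c.toNat := UInt32.le_iff_toNat_le.mp h1
    have hn2 : c.toNat ≤ 57 := UInt32.le_iff_toNat_le.mp h2
    have hc : c = Char.ofNat c.toNat := (Char.ofNat_toNat c).symm
    interval_cases h : c.toNat <;> rw [hc] <;> decide

-- one unfolding step of the scan, with the digit test rewritten through pvNum_contains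
lemma pvScan_cons (c : Char) (cs : List Char) (i s e : Int) :
    pvScan (c :: cs) i s e
      = (if ((if (s == -1 && PySem.Chars.isdigit c) = true then i else s) != -1
              && e == -1 && !(PySem.Chars.isdigit c)) = true
         then ((if (s == -1 && PySem.Chars.isdigit c) = true then i else s), i)
         else pvScan cs (i + 1) (if (s == -1 && PySem.Chars.isdigit c) = true then i else s) e) := by
  rw [pvScan]
  simp only [pvNum_contains]

-- pvScan after s has been set: it keeps s and breaks at the first non-digit
lemma pvScan_set (cs : List Char) : ∀ (i s : Int), s ≠ -1 →
    pvScan cs i s (-1)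
      = (s, if (cs.takeWhile PySem.Chars.isdigit).length = cs.length then -1
            else i + (cs.takeWhile PySem.Chars.isdigit).length) := by
  induction cs with
  | nil => intro i s _; simp [pvScan]
  | cons c cs ih =>
    intro i s hs
    have h1 : (s == (-1 : Int)) = false := by simp [hs]
    by_cases hd : PySem.Chars.isdigit c = true
    · have hstep : pvScan (c :: cs) i s (-1) = pvScan cs (i + 1) s (-1) := by
        rw [pvScan_cons]; simp [h1, hd]
      rw [hstep, ih (i + 1) s hs]
      simp only [List.takeWhile_cons, hd, if_true, List.length_cons]
      rcases eq_or_ne (cs.takeWhile PySem.Chars.isdigit).length cs.length with he | he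
      · simp [he]
      · rw [if_neg he, if_neg (by omega)]
        have : (i + 1) + ((cs.takeWhile PySem.Chars.isdigit).length : Int)
            = i + (((cs.takeWhile PySem.Chars.isdigit).length + 1 : Nat) : Int) := by
          push_cast; ring
        rw [this]
    · have hd' : PySem.Chars.isdigit c = false := Bool.eq_false_iff.mpr hd
      have hstep : pvScan (c :: cs) i s (-1) = (s, i) := by
        rw [pvScan_cons]; simp [h1, hd']
        exact fun hcon => absurd hcon hs
      have htw : (c :: cs).takeWhile PySem.Chars.isdigit = [] := by
        simp [hd']
      rw [hstep, htw]
      simp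

-- pvScan before s is set, on input whose remaining part contains a digit
lemma pvScan_unset (cs : List Char) : ∀ (i : Int), 0 ≤ i →
    (∃ c ∈ cs, PySem.Chars.isdigit c = true) →
    pvScan cs i (-1) (-1)
      = pvScan (cs.dropWhile (fun c => !PySem.Chars.isdigit c))
          (i + (cs.takeWhile (fun c => !PySem.Chars.isdigit c)).length)
          (i + (cs.takeWhile (fun c => !PySem.Chars.isdigit c)).length) (-1) := by
  induction cs with
  | nil => intro i _ h; simp at h
  | cons c cs ih =>
    intro i hi h
    by_cases hd : PySem.Chars.isdigit c = true
    · have hne : (i == (-1 : Int)) = false := by simp; omega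
      have htw : (c :: cs).takeWhile (fun c => !PySem.Chars.isdigit c) = [] := by
        simp [hd]
      have hdw : (c :: cs).dropWhile (fun c => !PySem.Chars.isdigit c) = c :: cs := by
        simp [hd]
      rw [htw, hdw]
      simp only [List.length_nil, Nat.cast_zero, add_zero]
      have hl : pvScan (c :: cs) i (-1) (-1) = pvScan cs (i + 1) i (-1) := by
        rw [pvScan_cons]; simp [hd]
      have hr : pvScan (c :: cs) i i (-1) = pvScan cs (i + 1) i (-1) := by
        rw [pvScan_cons]; simp [hd, hne]
      rw [hl, hr]
    · have hd' : PySem.Chars.isdigit c = false := Bool.eq_false_iff.mpr hd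
      have h' : ∃ x ∈ cs, PySem.Chars.isdigit x = true := by
        obtain ⟨x, hx, hxd⟩ := h
        rcases List.mem_cons.mp hx with rfl | hx'
        · exact absurd hxd hd
        · exact ⟨x, hx', hxd⟩
      have htw : (c :: cs).takeWhile (fun c => !PySem.Chars.isdigit c)
          = c :: cs.takeWhile (fun c => !PySem.Chars.isdigit c) := by
        simp [hd']
      have hdw : (c :: cs).dropWhile (fun c => !PySem.Chars.isdigit c)
          = cs.dropWhile (fun c => !PySem.Chars.isdigit c) := by
        simp [hd']
      have hstep : pvScan (c :: cs) i (-1) (-1) = pvScan cs (i + 1) (-1) (-1) := by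
        rw [pvScan_cons]; simp [hd']
      rw [htw, hdw, hstep, ih (i + 1) (by omega) h']
      simp only [List.length_cons]
      congr 1 <;> push_cast <;> ring

-- the two branch equations of pvParse, given the scan result
lemma pvParse_scan_end (f : String) (idx s : Int)
    (h : pvScan f.toList 0 (-1) (-1) = (s, -1)) :
    pvParse f idx
      = (PySem.Str.lower (PySem.Str.slice f (some 0) (some s)),
         (PySem.Int.ofStr? (PySem.Str.slice f (some s) none)).getD 0, "", idx) := by
  unfold pvParse
  rw [h]
  simp

lemma pvParse_scan_mid (f : String) (idx s e : Int) (he : (e == (-1 : Int)) = false)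
    (h : pvScan f.toList 0 (-1) (-1) = (s, e)) :
    pvParse f idx
      = (PySem.Str.lower (PySem.Str.slice f (some 0) (some s)),
         (PySem.Int.ofStr? (PySem.Str.slice f (some s) (some e))).getD 0,
         PySem.Str.slice f (some e) none, idx) := by
  unfold pvParse
  rw [h]
  simp [he]

-- the decorated tuple built by A carries B's key (and its own index)
lemma pvParse_keys (f : String) (idx : Int) (h : ∃ c ∈ f.toList, PySem.Chars.isdigit c = true) :
    (pvParse f idx).1 = pvHead f ∧ (pvParse f idx).2.1 = pvNumber f ∧
      (pvParse f idx).2.2.2 = idx := by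
  have hcat : f.toList.takeWhile (fun c => !PySem.Chars.isdigit c)
      ++ f.toList.dropWhile (fun c => !PySem.Chars.isdigit c) = f.toList :=
    List.takeWhile_append_dropWhile
  set cs := f.toList with hcs
  set nd := cs.takeWhile (fun c => !PySem.Chars.isdigit c) with hnd
  set rest := cs.dropWhile (fun c => !PySem.Chars.isdigit c) with hrest
  set ds := rest.takeWhile PySem.Chars.isdigit with hds
  have hdsle : ds.length ≤ rest.length := (List.takeWhile_sublist _).length_le
  have hnd_ne : ((0 : Int) + (nd.length : Int)) ≠ -1 := by
    have : (0 : Int) ≤ (nd.length : Int) := by positivity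
    omega
  have hscan0 : pvScan cs 0 (-1) (-1)
      = pvScan rest ((0 : Int) + nd.length) ((0 : Int) + nd.length) (-1) :=
    pvScan_unset cs 0 le_rfl h
  have hscan1 := pvScan_set rest ((0 : Int) + nd.length) ((0 : Int) + nd.length) hnd_ne
  have hslice_head : PySem.List.slice cs (some 0) (some (nd.length : Int)) = nd := by
    have h0 : ((0 : Nat) : Int) = (0 : Int) := rfl
    rw [← h0, PySem.List.slice_natCast cs 0 nd.length]
    simp only [Nat.sub_zero, List.drop_zero]
    rw [← hcat, List.take_left]
  have hslice_rest : PySem.List.slice cs (some (nd.length : Int)) none = rest := by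
    rw [PySem.List.slice_from cs (by positivity)]
    simp only [Int.toNat_natCast]
    rw [← hcat, List.drop_left]
  have hslice_ds : PySem.List.slice cs (some (nd.length : Int))
      (some ((nd.length : Int) + ds.length)) = ds := by
    have hcast : ((nd.length : Int) + ds.length) = ((nd.length + ds.length : Nat) : Int) := by
      push_cast; ring
    rw [hcast, PySem.List.slice_natCast cs nd.length (nd.length + ds.length)]
    simp only [Nat.add_sub_cancel_left]
    rw [← hcat, List.drop_left]
    exact (List.prefix_iff_eq_take.mp (List.takeWhile_prefix _)).symm
  have hhead : PySem.Str.lower (PySem.Str.slice f (some 0) (some ((nd.length : Int)))) = pvHead f := by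
    unfold pvHead
    congr 1
    simp only [PySem.Str.slice, PySem.Chars.slice, ← hcs, hslice_head]
    rw [hnd]
  by_cases hfull : ds.length = rest.length
  · have hde : ds = rest := List.IsPrefix.eq_of_length (List.takeWhile_prefix _) hfull
    have hscan : pvScan f.toList 0 (-1) (-1) = (((nd.length : Int)), -1) := by
      rw [← hcs, hscan0, hscan1, if_pos (by rw [← hds, hfull]), zero_add]
    rw [pvParse_scan_end f idx _ hscan]
    refine ⟨hhead, ?_, rfl⟩
    unfold pvNumber
    simp only [PySem.Int.ofStr?, PySem.Str.slice, PySem.Chars.slice, String.toList_ofList]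
    rw [← hcs, ← hrest, ← hds, hslice_rest, hde]
  · have hne2 : (((nd.length : Int) + ds.length) == (-1 : Int)) = false := by
      simp only [beq_eq_false_iff_ne, ne_eq]
      have h1 : (0 : Int) ≤ (nd.length : Int) := by positivity
      have h2 : (0 : Int) ≤ (ds.length : Int) := by positivity
      omega
    have hscan : pvScan f.toList 0 (-1) (-1)
        = (((nd.length : Int)), (nd.length : Int) + ds.length) := by
      rw [← hcs, hscan0, hscan1, if_neg (by rw [← hds]; exact hfull), zero_add]
    rw [pvParse_scan_mid f idx _ _ hne2 hscan]
    refine ⟨hhead, ?_, rfl⟩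
    unfold pvNumber
    simp only [PySem.Int.ofStr?, PySem.Str.slice, PySem.Chars.slice, String.toList_ofList]
    rw [← hcs, ← hrest, ← hds, hslice_ds]

-- lex-order facts about A's sort key
lemma pvKeyA_lt_of_tk_lt (a b : String × Int × String × Int)
    (h : toLex (pvTK a) < toLex (pvTK b)) : pvKeyA a < pvKeyA b := by
  unfold pvKeyA
  rcases Prod.Lex.lt_iff.mp h with h1 | ⟨h1, h2⟩
  · exact Prod.Lex.lt_iff.mpr (Or.inl h1)
  · exact Prod.Lex.lt_iff.mpr (Or.inr ⟨h1, Prod.Lex.lt_iff.mpr (Or.inl h2)⟩)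

lemma pvKeyA_lt_of_tk_eq (a b : String × Int × String × Int)
    (h : pvTK a = pvTK b) (hi : a.2.2.2 < b.2.2.2) : pvKeyA a < pvKeyA b := by
  unfold pvKeyA
  have h' : (a.1, a.2.1) = (b.1, b.2.1) := h
  simp only [Prod.mk.injEq] at h'
  exact Prod.Lex.lt_iff.mpr (Or.inr ⟨h'.1, Prod.Lex.lt_iff.mpr (Or.inr ⟨h'.2, hi⟩)⟩)

-- partition: flatMap of the key-filters over a complete duplicate-free key list is a permutation
lemma pvPerm_flatMap_filter {α κ : Type} [BEq κ] [LawfulBEq κ] (kf : α → κ) :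
    ∀ (ks : List κ) (xs : List α), ks.Nodup → (∀ x ∈ xs, kf x ∈ ks) →
      (ks.flatMap (fun c => xs.filter (fun x => kf x == c))).Perm xs := by
  intro ks
  induction ks with
  | nil =>
    intro xs _ hall
    have : xs = [] := by
      cases xs with
      | nil => rfl
      | cons x xs => exact absurd (hall x (List.mem_cons_self ..)) (List.not_mem_nil)
    simp [this]
  | cons c ks ih =>
    intro xs hnd hall
    rw [List.flatMap_cons]
    have hnotc : c ∉ ks := (List.nodup_cons.mp hnd).1
    have hfilt : ∀ c' ∈ ks, xs.filter (fun x => kf x == c')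
        = (xs.filter (fun x => !(kf x == c))).filter (fun x => kf x == c') := by
      intro c' hc'
      rw [List.filter_filter]
      apply List.filter_congr
      intro x _
      rcases h : kf x == c' with _ | _
      · simp
      · have : kf x = c' := eq_of_beq h
        have : ¬ (kf x == c) = true := by
          simp only [beq_iff_eq, this]
          intro hcc; exact hnotc (hcc ▸ hc')
        simp_all
    have hmapeq : ks.flatMap (fun c' => xs.filter (fun x => kf x == c'))
        = ks.flatMap (fun c' => (xs.filter (fun x => !(kf x == c))).filter (fun x => kf x == c')) := by
      simp only [List.flatMap_def]
      exact congrArg List.flatten (List.map_congr_left hfilt)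
    rw [hmapeq]
    have hall' : ∀ x ∈ xs.filter (fun x => !(kf x == c)), kf x ∈ ks := by
      intro x hx
      obtain ⟨hx1, hx2⟩ := List.mem_filter.mp hx
      have : kf x ≠ c := by simpa using hx2
      rcases List.mem_cons.mp (hall x hx1) with h | h
      · exact absurd h this
      · exact h
    have hperm := ih (xs.filter (fun x => !(kf x == c))) (List.nodup_cons.mp hnd).2 hall'
    exact (hperm.append_left _).trans (List.filter_append_perm (fun x => kf x == c) xs)

-- within one bucket of fileArr the (head, number) parts agree and the indices increase,
-- so A's full key is strictly increasing
lemma pvBlock_pairwise (files : List String)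
    (hPre : ∀ f ∈ files, ∃ ch ∈ f.toList, PySem.Chars.isdigit ch = true) (c : String × Int) :
    ∀ l : List Nat, l.Pairwise (· < ·) → (∀ k ∈ l, k < files.length) →
      (((l.map (fun (k : Nat) => pvParse (PySem.List.pyGetD files (k : Int) "") (k : Int))).filter
          (fun t => pvTK t == c)).Pairwise (fun a b => pvKeyA a < pvKeyA b)) := by
  intro l
  induction l with
  | nil => intro _ _; simp
  | cons k l ih =>
    intro hpw hlt
    obtain ⟨hk, hpw'⟩ := List.pairwise_cons.mp hpw
    rw [List.map_cons, List.filter_cons]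
    have htail := ih hpw' (fun k' hk' => hlt k' (List.mem_cons_of_mem _ hk'))
    rcases hcase : (pvTK (pvParse (PySem.List.pyGetD files (k : Int) "") (k : Int)) == c) with _ | _
    · simpa [hcase] using htail
    · simp only [if_true]
      rw [List.pairwise_cons]
      refine ⟨?_, htail⟩
      intro b hb
      obtain ⟨hb1, hb2⟩ := List.mem_filter.mp hb
      obtain ⟨k', hk', hbeq⟩ := List.mem_map.mp hb1
      have hkk' : k < k' := hk k' hk'
      apply pvKeyA_lt_of_tk_eq
      · have h1 : pvTK (pvParse (PySem.List.pyGetD files (k : Int) "") (k : Int)) = c :=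
          eq_of_beq hcase
        have h2 : pvTK b = c := eq_of_beq hb2
        rw [h1, h2]
      · have hidx : ∀ m : Nat, m < files.length →
            (pvParse (PySem.List.pyGetD files (m : Int) "") (m : Int)).2.2.2 = (m : Int) := by
          intro m hm
          have hFm : PySem.List.pyGetD files (m : Int) "" = files[m] :=
            PySem.List.pyGetD_eq_getElem files "" (by positivity) (by exact_mod_cast hm)
          exact (pvParse_keys _ _ (by rw [hFm]; exact hPre _ (List.getElem_mem hm))).2.2
        rw [← hbeq, hidx k (hlt k (List.mem_cons_self ..)),
          hidx k' (hlt k' (List.mem_cons_of_mem _ hk'))]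
        exact_mod_cast hkk'

-- extracting files[idx] from one bucket of fileArr gives the bucket of the files themselves
lemma pvBlock_map_ext (files : List String)
    (hPre : ∀ f ∈ files, ∃ ch ∈ f.toList, PySem.Chars.isdigit ch = true) (c : String × Int) :
    ∀ l : List Nat, (∀ k ∈ l, k < files.length) →
      (((l.map (fun (k : Nat) => pvParse (PySem.List.pyGetD files (k : Int) "") (k : Int))).filter
          (fun t => pvTK t == c)).map (fun t => PySem.List.pyGetD files t.2.2.2 ""))
        = ((l.map (fun (k : Nat) => PySem.List.pyGetD files (k : Int) "")).filter
            (fun f => pvKey f == c)) := by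
  intro l
  induction l with
  | nil => intro _; simp
  | cons k l ih =>
    intro hlt
    have hk : k < files.length := hlt k (List.mem_cons_self ..)
    have hF : PySem.List.pyGetD files (k : Int) "" = files[k] :=
      PySem.List.pyGetD_eq_getElem files "" (by positivity) (by exact_mod_cast hk)
    obtain ⟨h1, h2, h3⟩ := pvParse_keys (PySem.List.pyGetD files (k : Int) "") (k : Int)
      (by rw [hF]; exact hPre _ (List.getElem_mem hk))
    have htk : pvTK (pvParse (PySem.List.pyGetD files (k : Int) "") (k : Int))
        = pvKey (PySem.List.pyGetD files (k : Int) "") := by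
      unfold pvTK pvKey
      rw [h1, h2]
    have htail := ih (fun k' hk' => hlt k' (List.mem_cons_of_mem _ hk'))
    rw [List.map_cons, List.map_cons, List.filter_cons, List.filter_cons, htk]
    rcases hcase : (pvKey (PySem.List.pyGetD files (k : Int) "") == c) with _ | _
    · simpa [hcase] using htail
    · simp only [if_true, List.map_cons]
      rw [h3, htail]

-- the list of range indices read back through pyGetD is the file list itself
lemma pvMap_range_getD (files : List String) :
    (List.range files.length).map (fun (k : Nat) => PySem.List.pyGetD files (k : Int) "") = files := by
  apply List.ext_getElem
  · simp
  · intro i h1 h2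
    simp only [List.getElem_map, List.getElem_range]
    exact PySem.List.pyGetD_eq_getElem files "" (by positivity) (by exact_mod_cast h2)

-- ===== VERDICT (by name: the statement is the Claim_ definition above) =====
theorem solution_spec : Claim_equal_solution := by
  intro files _ hPre0
  have hPre : ∀ f ∈ files, ∃ ch ∈ f.toList, PySem.Chars.isdigit ch = true := by
    simpa [Pre_solution, List.all_eq_true, List.any_eq_true] using hPre0
  unfold Spec_solution
  show solution files = solution_alt files
  -- notation
  set n := files.length with hn
  set g := fun (k : Nat) => pvParse (PySem.List.pyGetD files (k : Int) "") (k : Int) with hg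
  set SK := PySem.List.sorted (PySem.Set.ofList (files.map pvKey)) (fun k => toLex k) false with hSK
  set OUT := SK.flatMap (fun c => files.filter (fun f => pvKey f == c)) with hOUT
  -- facts about SK
  have hSKnodup : SK.Nodup :=
    (PySem.List.sorted_perm _ _ _).nodup_iff.mpr (PySem.Set.nodup_ofList _)
  have hSKlt : SK.Pairwise (fun a b => toLex a < toLex b) := by
    have hle : SK.Pairwise (fun a b => toLex a ≤ toLex b) :=
      PySem.List.sorted_pairwise _ _
    have hne : SK.Pairwise (fun a b => a ≠ b) := hSKnodup
    refine (hle.and hne).imp ?_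
    rintro a b ⟨h1, h2⟩
    exact lt_of_le_of_ne h1 (fun hc => h2 (Prod.ext (congrArg Prod.fst hc) (congrArg Prod.snd hc)))
  have hSKmem : ∀ f ∈ files, pvKey f ∈ SK := by
    intro f hf
    rw [hSK, PySem.List.mem_sorted, PySem.Set.mem_ofList]
    exact List.mem_map_of_mem hf
  -- ===== side A =====
  have hlen : PySem.List.len files = (n : Int) := by simp [PySem.List.len, hn]
  have hA : solution files
      = (PySem.List.sorted ((List.range n).map g)
          (fun x => toLex (x.1, toLex (x.2.1, x.2.2.2))) false).map
          (fun t => PySem.List.pyGetD files t.2.2.2 "") := by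
    show ((PySem.List.sorted ((PySem.List.pyRange 0 (PySem.List.len files) 1).foldl
        (fun arr idx => arr ++ [pvParse (PySem.List.pyGetD files idx "") idx]) [])
        (fun x => toLex (x.1, toLex (x.2.1, x.2.2.2))) false).foldl
        (fun ans t => ans ++ [PySem.List.pyGetD files t.2.2.2 ""]) []) = _
    rw [PySem.List.foldl_append_singleton_eq_map, PySem.List.foldl_append_singleton_eq_map,
      List.nil_append, List.nil_append, hlen, PySem.List.pyRange_one]
    simp only [sub_zero, Int.toNat_natCast, zero_add, List.map_map]
    rfl
  have hcomplete : ∀ t ∈ (List.range n).map g, pvTK t ∈ SK := by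
    intro t ht
    obtain ⟨k, hk, rfl⟩ := List.mem_map.mp ht
    have hkn : k < n := List.mem_range.mp hk
    have hF : PySem.List.pyGetD files (k : Int) "" = files[k] :=
      PySem.List.pyGetD_eq_getElem files "" (by positivity) (by exact_mod_cast hkn)
    obtain ⟨h1, h2, _⟩ := pvParse_keys (PySem.List.pyGetD files (k : Int) "") (k : Int)
      (by rw [hF]; exact hPre _ (List.getElem_mem hkn))
    have : pvTK (g k) = pvKey (PySem.List.pyGetD files (k : Int) "") := by
      unfold pvTK pvKey; rw [hg]; exact Prod.ext h1 h2
    rw [this, hF]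
    exact hSKmem _ (List.getElem_mem hkn)
  have hsorted_eq : PySem.List.sorted ((List.range n).map g)
      (fun x => toLex (x.1, toLex (x.2.1, x.2.2.2))) false
      = SK.flatMap (fun c => ((List.range n).map g).filter (fun t => pvTK t == c)) := by
    apply PySem.List.sorted_eq_of_perm_of_pairwise_lt
    · exact pvPerm_flatMap_filter pvTK SK ((List.range n).map g) hSKnodup hcomplete
    · rw [List.pairwise_flatMap]
      constructor
      · intro c _
        exact pvBlock_pairwise files hPre c (List.range n) (List.pairwise_lt_range)
          (fun k hk => List.mem_range.mp hk)
      · refine hSKlt.imp ?_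
        intro c1 c2 hc x hx y hy
        obtain ⟨_, hx2⟩ := List.mem_filter.mp hx
        obtain ⟨_, hy2⟩ := List.mem_filter.mp hy
        apply pvKeyA_lt_of_tk_lt
        rw [eq_of_beq hx2, eq_of_beq hy2]
        exact hc
  have hAOUT : solution files = OUT := by
    rw [hA, hsorted_eq, List.map_flatMap, hOUT]
    apply List.flatMap_congr
    intro c _
    rw [pvBlock_map_ext files hPre c (List.range n) (fun k hk => List.mem_range.mp hk),
      pvMap_range_getD]
  -- ===== side B =====
  have hB : solution_alt files = OUT := by
    show (PySem.List.sorted (files.foldl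
        (fun d f => d.modify (pvKey f) [] (fun l => l ++ [f])) PySem.Dict.empty).keys
        (fun k => toLex k) false).foldl
        (fun out k => out ++ (files.foldl
          (fun d f => d.modify (pvKey f) [] (fun l => l ++ [f])) PySem.Dict.empty).getD k []) []
        = OUT
    have hfold : files.foldl (fun d f => d.modify (pvKey f) [] (fun l => l ++ [f]))
          (PySem.Dict.empty : PySem.Dict (String × Int) (List String))
        = (files.map (fun f => (pvKey f, f))).foldl
            (fun d p => d.modify p.1 [] (fun l => l ++ [p.2])) PySem.Dict.empty := by
      rw [List.foldl_map]
    have hkeys : (files.foldl (fun d f => d.modify (pvKey f) [] (fun l => l ++ [f]))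
          (PySem.Dict.empty : PySem.Dict (String × Int) (List String))).keys
        = PySem.Set.ofList (files.map pvKey) := by
      rw [PySem.Dict.keys_foldl_modify_key files pvKey [] (fun _ f => (fun l => l ++ [f]))
        PySem.Dict.empty]
      rfl
    have hgetD : ∀ c, (files.foldl (fun d f => d.modify (pvKey f) [] (fun l => l ++ [f]))
          (PySem.Dict.empty : PySem.Dict (String × Int) (List String))).getD c []
        = files.filter (fun f => pvKey f == c) := by
      intro c
      rw [hfold, PySem.Dict.getD_foldl_modify_append, List.filter_map, List.map_map]
      simp [Function.comp_def]
    rw [hkeys, PySem.List.foldl_append_eq_flatMap, List.nil_append, hOUT, hSK]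
    apply List.flatMap_congr
    intro c _
    exact hgetD c
  rw [hAOUT, hB]
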